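-- pv_equiv track=rewrite | github.com/ialberquilla/agent-invest | agent/scripts/agent_invest_scripts/write_memory.py | _parse_memory_document
-- ===== SOURCE A (Python) =====
-- _ALLOWED_SECTIONS = (
--     "preferences",
--     "patterns",
--     "tried",
--     "decisions",
--     "open_threads",
--     "next",
--     "spec",
-- )
--
-- def _parse_memory_document(document: str) -> dict[str, str]:
--     sections = {name: "" for name in _ALLOWED_SECTIONS}
--     normalized_document = document.replace("\r\n", "\n")
--
--     if not normalized_document.strip():
--         return sections
--
--     normalized_document = normalized_document.strip("\n")
--
--     current_section: str | None = None
--     current_lines: list[str] = []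
--     seen_sections: set[str] = set()
--
--     for line in normalized_document.split("\n"):
--         if line.startswith("## "):
--             if current_section is not None:
--                 sections[current_section] = _normalize_section_body(
--                     "\n".join(current_lines)
--                 )
--
--             current_section = line[3:].strip()
--             if current_section not in sections:
--                 raise ValueError(f"Unknown memory section header: {current_section}")
--             if current_section in seen_sections:
--                 raise ValueError(f"Duplicate memory section header: {current_section}")
--
--             seen_sections.add(current_section)
--             current_lines = []
--             continue
--
--         if current_section is None:
--             if line.strip():
--                 raise ValueError(
--                     "Memory file must contain only named '## <section>' headings"
--                 )
--             continue
--
--         current_lines.append(line)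
--
--     if current_section is None:
--         raise ValueError("Memory file must contain only named '## <section>' headings")
--
--     sections[current_section] = _normalize_section_body("\n".join(current_lines))
--     return sections
--
-- def _normalize_section_body(content: str) -> str:
--     return content.replace("\r\n", "\n").strip("\n")
-- ===== SOURCE B (Python) =====
-- _ALLOWED_SECTIONS = (
--     "preferences",
--     "patterns",
--     "tried",
--     "decisions",
--     "open_threads",
--     "next",
--     "spec",
-- )
--
--
-- def _normalize_section_body(content: str) -> str:
--     return content.replace("\r\n", "\n").strip("\n")
--
--
-- def _parse_memory_document(document: str) -> dict[str, str]:
--     sections = {name: "" for name in _ALLOWED_SECTIONS}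
--     text = document.replace("\r\n", "\n")
--     if not text.strip():
--         return sections
--
--     # Pass 1: partition lines into a preamble and (header, body-lines) segments.
--     preamble: list[str] = []
--     segments: list[tuple[str, list[str]]] = []
--     for line in text.strip("\n").split("\n"):
--         if line.startswith("## "):
--             segments.append((line[3:].strip(), []))
--         elif segments:
--             segments[-1][1].append(line)
--         else:
--             preamble.append(line)
--
--     if any(line.strip() for line in preamble) or not segments:
--         raise ValueError("Memory file must contain only named '## <section>' headings")
--
--     # Pass 2: validate each segment in document order and fill the defaults.
--     seen: set[str] = set()
--     for name, body in segments:
--         if name not in sections: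
--             raise ValueError(f"Unknown memory section header: {name}")
--         if name in seen:
--             raise ValueError(f"Duplicate memory section header: {name}")
--         seen.add(name)
--         sections[name] = _normalize_section_body("\n".join(body))
--     return sections
-- ===== Notes on version B (the rewrite author's own statement) =====
-- stated objective: alternative
-- what changed: A's single stateful loop (current_section/current_lines/seen juggled per line) is replaced by a two-pass pipeline: one pass partitions the lines into a preamble plus (header, body-lines) segments, a second pass validates and fills the sections dict.
import Mathlib
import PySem

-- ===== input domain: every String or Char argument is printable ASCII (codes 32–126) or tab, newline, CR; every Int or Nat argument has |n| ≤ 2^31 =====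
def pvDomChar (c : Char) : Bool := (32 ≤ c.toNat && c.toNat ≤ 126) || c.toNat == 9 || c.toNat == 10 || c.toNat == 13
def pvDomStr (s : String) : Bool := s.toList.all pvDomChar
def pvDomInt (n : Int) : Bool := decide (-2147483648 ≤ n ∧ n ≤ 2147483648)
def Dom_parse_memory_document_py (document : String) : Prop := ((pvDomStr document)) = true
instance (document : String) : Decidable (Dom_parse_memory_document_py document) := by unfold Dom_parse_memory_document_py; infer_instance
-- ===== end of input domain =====

-- B re-decomposes A's single stateful line loop into a partition pass (preamble + header/body segments) followed by a validation pass; same return value wherever A returns (objective: alternative decomposition, not speed).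

-- shared module context: _ALLOWED_SECTIONS and _normalize_section_body (identical in Source A and Source B)
def pvAllowed : List String :=
  ["preferences", "patterns", "tried", "decisions", "open_threads", "next", "spec"]

def pvInitSections : PySem.Dict String String :=
  PySem.Dict.ofList (pvAllowed.map (fun n => (n, "")))

def pvNormBody (s : String) : String :=
  PySem.Str.stripChars (PySem.Str.replace s "\r\n" "\n") "\n"

-- line.startswith("## ")
def pvHdr (l : String) : Bool := PySem.Str.startswith l "## "

-- line.strip() is truthy / falsy
def pvBlank (l : String) : Bool := PySem.Str.len (PySem.Str.strip l) == 0

-- line[3:].strip()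
def pvName (l : String) : String := PySem.Str.strip (PySem.Str.slice l (some 3) none)

-- ===== PORT A =====
-- A's main loop; state = (sections, current_section, current_lines, seen); none = raise ValueError
def pvALoop : List String → PySem.Dict String String → Option String → List String →
    PySem.Set String → Option (PySem.Dict String String)
  | [], sections, cur, curLines, _seen =>
    match cur with
    | none => none
    | some c => some (sections.insert c (pvNormBody (PySem.Str.join "\n" curLines)))
  | line :: rest, sections, cur, curLines, seen =>
    if pvHdr line then
      let sections' :=
        match cur with
        | some c => sections.insert c (pvNormBody (PySem.Str.join "\n" curLines))
        | none => sections
      let name := pvName line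
      if sections'.contains name = false then none
      else if name ∈ seen then none
      else pvALoop rest sections' (some name) [] (seen.add name)
    else
      match cur with
      | none => if pvBlank line then pvALoop rest sections cur curLines seen else none
      | some _ => pvALoop rest sections cur (curLines ++ [line]) seen

def pvACore (lines : List String) : Option (PySem.Dict String String) :=
  pvALoop lines pvInitSections none [] (PySem.Set.ofList [])

def parse_memory_document_py (document : String) : List (String × String) :=
  let nd := PySem.Str.replace document "\r\n" "\n"
  if PySem.Str.len (PySem.Str.strip nd) = 0 then pvInitSections.items
  else
    -- split("\n"): separator is nonempty, so split? is always some here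
    match pvACore ((PySem.Str.split? (PySem.Str.stripChars nd "\n") "\n").getD []) with
    | some d => d.items
    | none => []  -- ValueError in Python; excluded by Pre_

-- ===== PORT B =====
-- pass 1 helper: segments[-1][1].append(line)
def pvAppendLast (segs : List (String × List String)) (line : String) : List (String × List String) :=
  match segs with
  | [] => []
  | [(n, b)] => [(n, b ++ [line])]
  | s :: rest => s :: pvAppendLast rest line

-- pass 1 step: partition a line into preamble / a new segment / the last segment's body
def pvBStep (st : List String × List (String × List String)) (line : String) :
    List String × List (String × List String) :=
  if pvHdr line then (st.1, st.2 ++ [(pvName line, [])])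
  else if st.2.isEmpty then (st.1 ++ [line], st.2)
  else (st.1, pvAppendLast st.2 line)

-- pass 2: validate segments in order and fill the defaults; none = raise ValueError
def pvValLoop : List (String × List String) → PySem.Dict String String → PySem.Set String →
    Option (PySem.Dict String String)
  | [], sections, _seen => some sections
  | (name, body) :: rest, sections, seen =>
    if sections.contains name = false then none
    else if name ∈ seen then none
    else pvValLoop rest (sections.insert name (pvNormBody (PySem.Str.join "\n" body))) (seen.add name)

-- the two raise-checks between the passes, then pass 2
def pvFinish (st : List String × List (String × List String)) (sections : PySem.Dict String String)
    (seen : PySem.Set String) : Option (PySem.Dict String String) :=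
  if st.1.any (fun l => !(pvBlank l)) || st.2.isEmpty then none
  else pvValLoop st.2 sections seen

def pvBCore (lines : List String) : Option (PySem.Dict String String) :=
  pvFinish (List.foldl pvBStep ([], []) lines) pvInitSections (PySem.Set.ofList [])

def parse_memory_document_py_alt (document : String) : List (String × String) :=
  let nd := PySem.Str.replace document "\r\n" "\n"
  if PySem.Str.len (PySem.Str.strip nd) = 0 then pvInitSections.items
  else
    match pvBCore ((PySem.Str.split? (PySem.Str.stripChars nd "\n") "\n").getD []) with
    | some d => d.items
    | none => []  -- ValueError in Python

-- ===== PRECONDITION & SPEC =====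
-- Exactly the inputs on which Python A returns (no ValueError): a blank document, or one whose
-- preamble lines are blank, which has at least one '## ' header, all header names allowed and distinct.
def Pre_parse_memory_document_py (document : String) : Prop :=
  let nd := PySem.Str.replace document "\r\n" "\n"
  PySem.Str.len (PySem.Str.strip nd) = 0 ∨
    (let lines := (PySem.Str.split? (PySem.Str.stripChars nd "\n") "\n").getD []
     (∀ l ∈ lines.takeWhile (fun l => !(pvHdr l)), pvBlank l = true) ∧
     (∃ l ∈ lines, pvHdr l = true) ∧
     (∀ l ∈ lines, pvHdr l = true → pvName l ∈ pvAllowed) ∧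
     ((lines.filter (fun l => pvHdr l)).map pvName).Nodup)
instance (document : String) : Decidable (Pre_parse_memory_document_py document) := by
  unfold Pre_parse_memory_document_py; infer_instance

def pvWitness_parse_memory_document_py : String := "## spec\nhello"

def Spec_parse_memory_document_py (document : String) (out : List (String × String)) : Prop :=
  out = parse_memory_document_py_alt document
instance (document : String) (out : List (String × String)) :
    Decidable (Spec_parse_memory_document_py document out) := by
  unfold Spec_parse_memory_document_py; infer_instance

-- ===== CLAIM (what is proved, stated in full; the proofs are below) =====
def Claim_equal_parse_memory_document_py : Prop :=
  ∀ (document : String), Dom_parse_memory_document_py document →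
    Pre_parse_memory_document_py document →
    Spec_parse_memory_document_py document (parse_memory_document_py document)

-- ===== LEMMAS AND PROOFS =====

-- proof-side helper: the segments pass 1 produces from the rest of the lines, given the
-- pending segment (n, b)
def pvSegsCont : List String → String → List String → List (String × List String)
  | [], n, b => [(n, b)]
  | l :: ls, n, b =>
    if pvHdr l then (n, b) :: pvSegsCont ls (pvName l) []
    else pvSegsCont ls n (b ++ [l])

theorem pvAppendLast_append (segs : List (String × List String)) (n : String) (b : List String)
    (line : String) : pvAppendLast (segs ++ [(n, b)]) line = segs ++ [(n, b ++ [line])] := by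
  induction segs with
  | nil => rfl
  | cons s rest ih =>
    cases rest with
    | nil => cases s; rfl
    | cons t ts => simpa [pvAppendLast] using ih

theorem pvFoldl_pvBStep (ls : List String) :
    ∀ (pre segs : _) (n : String) (b : List String),
    List.foldl pvBStep (pre, segs ++ [(n, b)]) ls = (pre, segs ++ pvSegsCont ls n b) := by
  induction ls with
  | nil => intro pre segs n b; simp [pvSegsCont]
  | cons l ls ih =>
    intro pre segs n b
    by_cases h : pvHdr l = true
    · have := ih pre (segs ++ [(n, b)]) (pvName l) []
      simp [pvBStep, h, pvSegsCont] at this ⊢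
      simpa using this
    · simp [pvBStep, h, pvSegsCont, pvAppendLast_append, ih pre segs n (b ++ [l])]

theorem pvSegsCont_head (ls : List String) :
    ∀ (n : String) (b : List String), ∃ b' rest, pvSegsCont ls n b = (n, b') :: rest := by
  induction ls with
  | nil => intro n b; exact ⟨b, [], rfl⟩
  | cons l ls ih =>
    intro n b
    by_cases h : pvHdr l = true
    · exact ⟨b, pvSegsCont ls (pvName l) [], by simp [pvSegsCont, h]⟩
    · simpa [pvSegsCont, h] using ih n (b ++ [l])

theorem pvValLoop_none (ls : List String) (n : String) (b : List String)
    (d : PySem.Dict String String) (seen : PySem.Set String)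
    (h : d.contains n = false ∨ n ∈ seen) :
    pvValLoop (pvSegsCont ls n b) d seen = none := by
  obtain ⟨b', rest, hs⟩ := pvSegsCont_head ls n b
  rw [hs]
  rcases h with h | h
  · simp [pvValLoop, h]
  · by_cases hc : d.contains n = false <;> simp [pvValLoop, hc, h]

theorem pvM (ls : List String) :
    ∀ (n : String) (b : List String) (d : PySem.Dict String String) (seen : PySem.Set String),
    d.contains n = true → n ∉ seen →
    pvALoop ls d (some n) b (seen.add n) = pvValLoop (pvSegsCont ls n b) d seen := by
  induction ls with
  | nil =>
    intro n b d seen hc hs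
    simp [pvALoop, pvSegsCont, pvValLoop, hc, hs]
  | cons l ls ih =>
    intro n b d seen hc hs
    by_cases h : pvHdr l = true
    · have hhead : pvValLoop ((n, b) :: pvSegsCont ls (pvName l) []) d seen
          = pvValLoop (pvSegsCont ls (pvName l) [])
              (d.insert n (pvNormBody (PySem.Str.join "\n" b))) (seen.add n) := by
        simp [pvValLoop, hc, hs]
      rw [show pvSegsCont (l :: ls) n b = (n, b) :: pvSegsCont ls (pvName l) [] by
            simp [pvSegsCont, h], hhead]
      by_cases hc' : (d.insert n (pvNormBody (PySem.Str.join "\n" b))).contains (pvName l) = true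
      · by_cases hs' : pvName l ∈ seen.add n
        · rw [pvValLoop_none ls (pvName l) []
                (d.insert n (pvNormBody (PySem.Str.join "\n" b))) (seen.add n) (Or.inr hs')]
          simp [pvALoop, h, hc', hs']
        · rw [← ih (pvName l) [] (d.insert n (pvNormBody (PySem.Str.join "\n" b)))
                (seen.add n) hc' hs']
          simp [pvALoop, h, hc', hs']
      · rw [pvValLoop_none ls (pvName l) []
              (d.insert n (pvNormBody (PySem.Str.join "\n" b))) (seen.add n)
              (Or.inl (by simpa using hc'))]
        simp [pvALoop, h, Bool.eq_false_iff.mpr hc']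
    · rw [show pvSegsCont (l :: ls) n b = pvSegsCont ls n (b ++ [l]) by simp [pvSegsCont, h],
          ← ih n (b ++ [l]) d seen hc hs]
      simp [pvALoop, h]

theorem pvFoldl_pre_prefix (ls : List String) :
    ∀ (pre : List String) (segs : List (String × List String)),
    ∃ q, (List.foldl pvBStep (pre, segs) ls).1 = pre ++ q := by
  induction ls with
  | nil => intro pre segs; exact ⟨[], by simp⟩
  | cons l ls ih =>
    intro pre segs
    by_cases h : pvHdr l = true
    · obtain ⟨q, hq⟩ := ih pre (segs ++ [(pvName l, [])])
      exact ⟨q, by simpa [pvBStep, h] using hq⟩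
    · by_cases he : segs.isEmpty
      · obtain ⟨q, hq⟩ := ih (pre ++ [l]) segs
        exact ⟨l :: q, by simp [pvBStep, h, he, hq]⟩
      · obtain ⟨q, hq⟩ := ih pre (pvAppendLast segs l)
        exact ⟨q, by simpa [pvBStep, h, he] using hq⟩

theorem pvP (ls : List String) :
    ∀ (pre : List String) (seen : PySem.Set String),
    (∀ l ∈ pre, pvBlank l = true) →
    pvALoop ls pvInitSections none [] seen
      = pvFinish (List.foldl pvBStep (pre, []) ls) pvInitSections seen := by
  induction ls with
  | nil =>
    intro pre seen hpre
    simp [pvALoop, pvFinish]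
  | cons l ls ih =>
    intro pre seen hpre
    by_cases h : pvHdr l = true
    · have hstep : List.foldl pvBStep (pre, []) (l :: ls)
          = (pre, pvSegsCont ls (pvName l) []) := by
        have := pvFoldl_pvBStep ls pre [] (pvName l) []
        simpa [pvBStep, h] using this
      rw [hstep]
      obtain ⟨b', rest, hshape⟩ := pvSegsCont_head ls (pvName l) []
      have hanyf : pre.any (fun l => !(pvBlank l)) = false := by
        simp only [List.any_eq_false]
        intro x hx
        simp [hpre x hx]
      have hfin : pvFinish (pre, pvSegsCont ls (pvName l) []) pvInitSections seen
          = pvValLoop (pvSegsCont ls (pvName l) []) pvInitSections seen := by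
        simp [pvFinish, hanyf, hshape]
      rw [hfin]
      by_cases hc : pvInitSections.contains (pvName l) = true
      · by_cases hs : pvName l ∈ seen
        · rw [pvValLoop_none ls (pvName l) [] _ seen (Or.inr hs)]
          simp [pvALoop, h, hc, hs]
        · rw [← pvM ls (pvName l) [] pvInitSections seen hc hs]
          simp [pvALoop, h, hc, hs]
      · rw [pvValLoop_none ls (pvName l) [] _ seen (Or.inl (by simpa using hc))]
        simp [pvALoop, h, Bool.eq_false_iff.mpr hc]
    · by_cases hb : pvBlank l = true
      · have hstep : List.foldl pvBStep (pre, []) (l :: ls)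
            = List.foldl pvBStep (pre ++ [l], []) ls := by
          simp [pvBStep, h]
        rw [hstep, ← ih (pre ++ [l]) seen (by
          intro x hx
          rcases List.mem_append.mp hx with hx | hx
          · exact hpre x hx
          · simpa using (List.mem_singleton.mp hx ▸ hb))]
        simp [pvALoop, h, hb]
      · have hstep : List.foldl pvBStep (pre, []) (l :: ls)
            = List.foldl pvBStep (pre ++ [l], []) ls := by
          simp [pvBStep, h]
        obtain ⟨q, hq⟩ := pvFoldl_pre_prefix ls (pre ++ [l]) ([] : List (String × List String))
        have hany : ((List.foldl pvBStep (pre ++ [l], []) ls).1.any fun l => !(pvBlank l)) = true := by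
          rw [hq]
          exact List.any_eq_true.mpr ⟨l, by simp, by simp [hb]⟩
        have hfin : pvFinish (List.foldl pvBStep (pre, []) (l :: ls)) pvInitSections seen
            = none := by
          rw [hstep]
          simp [pvFinish, hany]
        rw [hfin]
        simp [pvALoop, h, hb]

theorem pvCore_eq (lines : List String) : pvACore lines = pvBCore lines := by
  unfold pvACore pvBCore
  exact pvP lines [] (PySem.Set.ofList []) (by simp)

-- ===== VERDICT (by name: the statement is the Claim_ definition above) =====
theorem parse_memory_document_py_spec : Claim_equal_parse_memory_document_py := by
  intro document _ _
  unfold Spec_parse_memory_document_py parse_memory_document_py parse_memory_document_py_alt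
  simp only [pvCore_eq]
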